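-- pv_equiv track=rewrite | github.com/fafnerzhang/codetrekking | application/peakflow/peakflow/processors/fitparse_processor.py | _is_essential_session_field
-- ===== SOURCE A (Python) =====
-- def _is_essential_session_field(field_name: str) -> bool:
--     """Check if field is essential session information that should be at top level"""
--     field_lower = field_name.lower()
--     essential_indicators = [
--         'distance', 'total_distance',
--         'elapsed_time', 'total_elapsed_time', 'timer_time',
--         'calories', 'total_calories',
--         'avg_speed', 'max_speed',
--         'avg_heart_rate', 'max_heart_rate',
--         'total_ascent', 'total_descent',
--         'avg_cadence', 'max_cadence',
--         'training_stress_score', 'tss',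
--         'normalized_power', 'np',
--         'intensity_factor', 'if',
--         'threshold_power', 'ftp'
--     ]
--     return any(indicator in field_lower for indicator in essential_indicators)
-- ===== SOURCE B (Python) =====
-- # Essential-field detection via one compiled regex: an alternation of the
-- # literal indicators (escaped), searched once over the lowercased name.
-- import re
--
-- _ESSENTIAL = re.compile('|'.join(map(re.escape, (
--     'distance', 'elapsed_time', 'timer_time', 'calories',
--     'avg_speed', 'max_speed', 'avg_heart_rate', 'max_heart_rate',
--     'total_ascent', 'total_descent', 'avg_cadence', 'max_cadence',
--     'training_stress_score', 'tss', 'normalized_power', 'np',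
--     'intensity_factor', 'if', 'threshold_power', 'ftp',
-- ))))
--
-- def _is_essential_session_field(field_name: str) -> bool:
--     return _ESSENTIAL.search(field_name.lower()) is not None
-- ===== Notes on version B (the rewrite author's own statement) =====
-- stated objective: idiomatic
-- what changed: Replaces A's per-indicator substring-containment loop by one compiled regular expression (an alternation of the escaped indicators, with redundant supersets like 'total_distance' pruned) searched once over the lowercased name.
import Mathlib
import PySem

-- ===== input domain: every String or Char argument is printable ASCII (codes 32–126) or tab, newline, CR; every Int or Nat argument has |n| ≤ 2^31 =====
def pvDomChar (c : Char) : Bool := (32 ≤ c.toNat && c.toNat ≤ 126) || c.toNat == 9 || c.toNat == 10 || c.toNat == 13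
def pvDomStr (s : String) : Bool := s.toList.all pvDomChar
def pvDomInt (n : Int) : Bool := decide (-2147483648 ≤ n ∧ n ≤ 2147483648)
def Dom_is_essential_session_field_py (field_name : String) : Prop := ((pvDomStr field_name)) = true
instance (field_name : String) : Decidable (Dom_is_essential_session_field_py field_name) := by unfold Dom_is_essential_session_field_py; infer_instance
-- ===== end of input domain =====

-- B replaces A's per-indicator substring loop by one compiled regex (an alternation of
-- the escaped indicators, redundant supersets pruned) searched over the lowercased name (idiomatic).

-- ===== PORT A =====
def pvIndicatorsA : List String :=
  ["distance", "total_distance",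
   "elapsed_time", "total_elapsed_time", "timer_time",
   "calories", "total_calories",
   "avg_speed", "max_speed",
   "avg_heart_rate", "max_heart_rate",
   "total_ascent", "total_descent",
   "avg_cadence", "max_cadence",
   "training_stress_score", "tss",
   "normalized_power", "np",
   "intensity_factor", "if",
   "threshold_power", "ftp"]

def is_essential_session_field_py (field_name : String) : Bool :=
  let field_lower := PySem.Str.lower field_name
  pvIndicatorsA.any (fun indicator => PySem.Str.isIn indicator field_lower)

-- ===== PORT B =====
-- the tokens of B's alternation pattern, in pattern order (all literals after re.escape)
def pvTokensB : List (List Char) :=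
  ["distance".toList, "elapsed_time".toList, "timer_time".toList, "calories".toList,
   "avg_speed".toList, "max_speed".toList, "avg_heart_rate".toList, "max_heart_rate".toList,
   "total_ascent".toList, "total_descent".toList, "avg_cadence".toList, "max_cadence".toList,
   "training_stress_score".toList, "tss".toList, "normalized_power".toList, "np".toList,
   "intensity_factor".toList, "if".toList, "threshold_power".toList, "ftp".toList]

-- hand port of re.search for a pure alternation of literals (no Lean regex library):
-- exact on all inputs — the engine scans start positions left to right and at each
-- position tries the alternatives in pattern order; a match anywhere means 'found'.
def scanB : List Char → Bool
  | [] => false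
  | c :: t => pvTokensB.any (fun tok => List.isPrefixOf tok (c :: t)) || scanB t

def is_essential_session_field_py_alt (field_name : String) : Bool :=
  scanB (PySem.Str.lower field_name).toList

-- ===== PRECONDITION & SPEC =====
def Spec_is_essential_session_field_py (field_name : String) (out : Bool) : Prop := out = is_essential_session_field_py_alt field_name
instance (field_name : String) (out : Bool) : Decidable (Spec_is_essential_session_field_py field_name out) := by unfold Spec_is_essential_session_field_py; infer_instance

-- ===== CLAIM (what is proved, stated in full; the proofs are below) =====
def Claim_equal_is_essential_session_field_py : Prop := ∀ (field_name : String), Dom_is_essential_session_field_py field_name → Spec_is_essential_session_field_py field_name (is_essential_session_field_py field_name)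

-- ===== LEMMAS AND PROOFS =====

lemma scanB_eq_true_iff (cs : List Char) : scanB cs = true ↔ ∃ tok ∈ pvTokensB, tok <:+: cs := by
  induction cs with
  | nil =>
    simp only [scanB, Bool.false_eq_true, false_iff]
    rintro ⟨tok, htok, hinf⟩
    rw [List.infix_nil] at hinf
    subst hinf
    revert htok; decide
  | cons c t ih =>
    simp only [scanB, Bool.or_eq_true, List.any_eq_true, List.isPrefixOf_iff_prefix, ih]
    constructor
    · rintro (⟨tok, htok, hp⟩ | ⟨tok, htok, hi⟩)
      · exact ⟨tok, htok, hp.isInfix⟩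
      · exact ⟨tok, htok, hi.trans (List.suffix_cons c t).isInfix⟩
    · rintro ⟨tok, htok, hi⟩
      rcases List.infix_cons_iff.mp hi with hp | hi'
      · exact Or.inl ⟨tok, htok, hp⟩
      · exact Or.inr ⟨tok, htok, hi'⟩

lemma exists_infix_mono (X Y : List (List Char)) (h : ∀ a ∈ X, ∃ b ∈ Y, b <:+: a)
    (cs : List Char) : (∃ a ∈ X, a <:+: cs) → ∃ b ∈ Y, b <:+: cs := by
  rintro ⟨a, ha, h2⟩
  obtain ⟨b, hb, h1⟩ := h a ha
  exact ⟨b, hb, h1.trans h2⟩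

-- ===== VERDICT (by name: the statement is the Claim_ definition above) =====
theorem is_essential_session_field_py_spec : Claim_equal_is_essential_session_field_py := by
  intro s _
  unfold Spec_is_essential_session_field_py is_essential_session_field_py is_essential_session_field_py_alt
  rw [Bool.eq_iff_iff, scanB_eq_true_iff]
  simp only [List.any_eq_true, PySem.Str.isIn_eq, PySem.Chars.isIn_iff_infix]
  constructor
  · rintro ⟨ind, hind, hin⟩
    refine exists_infix_mono (pvIndicatorsA.map String.toList) pvTokensB (by decide) _ ?_
    exact ⟨ind.toList, List.mem_map_of_mem hind, hin⟩
  · intro h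
    obtain ⟨a, ha, hinf⟩ :=
      exists_infix_mono pvTokensB (pvIndicatorsA.map String.toList) (by decide) _ h
    obtain ⟨ind, hind, rfl⟩ := List.mem_map.mp ha
    exact ⟨ind, hind, hinf⟩
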